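-- pv_equiv track=rewrite | github.com/Martianmellow12/AdventOfCode_2024 | day_7/solution_p2.py | inc_op_set
-- ===== SOURCE A (Python) =====
-- def inc_op_set(op_set):
--     # + -> * -> ||
--     idx = 0
--     while True:
--         if idx >= len(op_set): break
--         if op_set[idx] == "+":
--             op_set[idx] = "*"
--             break
--         if op_set[idx] == "*":
--             op_set[idx] = "||"
--             break
--
--         # Carry case
--         if op_set[idx] == "||":
--             op_set[idx] = "+"
--             idx += 1
--     return op_set
-- ===== SOURCE B (Python) =====
-- # Base-3 arithmetic rewrite: the increment can only touch the leading "||" run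
-- # and the operator after it; encode that window as a little-endian base-3 number,
-- # add 1 modulo 3**w, and decode the digits back in place (same mutation as A).
-- def inc_op_set(op_set):
--     # + -> * -> ||
--     val = {"+": 0, "*": 1, "||": 2}
--     sym = ["+", "*", "||"]
--     w = next((i + 1 for i, op in enumerate(op_set) if op != "||"), len(op_set))
--     n = sum(val[op_set[i]] * 3**i for i in range(w))
--     m = (n + 1) % 3**w
--     for i in range(w):
--         op_set[i] = sym[(m // 3**i) % 3]
--     return op_set
-- ===== Notes on version B (the rewrite author's own statement) =====
-- stated objective: alternative
-- what changed: Replaces A's carry-propagating compare-and-mutate index walk by base-3 integer arithmetic: the window the increment can touch (the leading '||' run plus the next operator) is encoded as a little-endian base-3 number, incremented modulo 3**w, and its digits decoded back into the list.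
import Mathlib
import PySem

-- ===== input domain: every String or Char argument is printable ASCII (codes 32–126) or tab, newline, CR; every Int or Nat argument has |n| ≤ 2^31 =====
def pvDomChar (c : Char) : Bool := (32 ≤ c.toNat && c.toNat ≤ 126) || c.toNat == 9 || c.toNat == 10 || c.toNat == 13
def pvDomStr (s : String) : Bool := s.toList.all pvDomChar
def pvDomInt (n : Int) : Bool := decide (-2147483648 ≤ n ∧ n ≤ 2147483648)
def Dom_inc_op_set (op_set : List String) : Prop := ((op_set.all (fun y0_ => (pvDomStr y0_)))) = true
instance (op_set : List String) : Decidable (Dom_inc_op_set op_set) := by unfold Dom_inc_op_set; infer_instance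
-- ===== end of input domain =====

-- B replaces A's carry-propagating compare-and-mutate walk by base-3 integer arithmetic on the
-- window the increment can touch: encode it, add 1 mod 3^w, decode (objective: alternative).
-- Both Pythons mutate op_set in place; the equivalence proved here is about the RETURN value.

-- ===== PORT A =====
-- the 'while True' loop of A; idx walks forward only on the "||" carry branch.
-- In the final 'else' (an element that is none of "+", "*", "||") Python loops forever;
-- that input is excluded by Pre_inc_op_set, and the port returns op_set there.
def incLoopA (op_set : List String) (idx : Nat) : List String :=
  if _h : op_set.length ≤ idx then op_set
  else if op_set.getD idx "" = "+" then op_set.set idx "*"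
  else if op_set.getD idx "" = "*" then op_set.set idx "||"
  else if op_set.getD idx "" = "||" then incLoopA (op_set.set idx "+") (idx + 1)
  else op_set
termination_by op_set.length - idx
decreasing_by simp only [List.length_set]; omega

def inc_op_set (op_set : List String) : List String := incLoopA op_set 0

-- ===== PORT B =====
-- w = next((i + 1 for i, op in enumerate(op_set) if op != "||"), len(op_set)) is the
-- first-match-with-default, ported as findIdx? with the same default; val[op_set[i]]
-- (KeyError only outside Pre_) is ported as getD 0; indices ≥ w keep their elements,
-- so the written-back prefix is appended to the untouched suffix.
def inc_op_set_alt (op_set : List String) : List String :=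
  let val : PySem.Dict String Int := PySem.Dict.ofList [("+", 0), ("*", 1), ("||", 2)]
  let sym : List String := ["+", "*", "||"]
  let w : Nat := match op_set.findIdx? (fun op => op != "||") with
    | some i => i + 1
    | none => op_set.length
  let n : Int := ((List.range w).map
      (fun (i : Nat) => ((val.get? (PySem.List.pyGetD op_set (i : Int) "")).getD 0) * 3 ^ i)).sum
  let m : Int := PySem.Int.mod (n + 1) (3 ^ w)
  -- for i in range(w): op_set[i] = sym[(m // 3**i) % 3]
  ((List.range w).map (fun i =>
    (PySem.List.pyGet? sym (PySem.Int.mod (PySem.Int.floordiv m (3 ^ i)) 3)).getD ""))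
    ++ op_set.drop w

-- ===== PRECONDITION & SPEC =====
-- Pre_ excludes exactly the inputs on which Python A loops forever (never returns): those whose
-- first non-"||" element is not "+" or "*". On every input A returns on, Pre_ holds.
def Pre_inc_op_set (op_set : List String) : Prop :=
  ∀ s ∈ (op_set.dropWhile (fun t => t == "||")).take 1, s = "+" ∨ s = "*"
instance (op_set : List String) : Decidable (Pre_inc_op_set op_set) := by
  unfold Pre_inc_op_set; infer_instance

def pvWitness_inc_op_set : List String := ["||", "+", "*"]

def Spec_inc_op_set (op_set : List String) (out : List String) : Prop := out = inc_op_set_alt op_set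
instance (op_set : List String) (out : List String) : Decidable (Spec_inc_op_set op_set out) := by unfold Spec_inc_op_set; infer_instance

-- ===== CLAIM (what is proved, stated in full; the proofs are below) =====
def Claim_equal_inc_op_set : Prop := ∀ (op_set : List String), Dom_inc_op_set op_set → Pre_inc_op_set op_set → Spec_inc_op_set op_set (inc_op_set op_set)

-- ===== LEMMAS AND PROOFS =====

-- common specification both ports are reduced to
def pvIncSpec : List String → List String
  | [] => []
  | x :: xs => if x = "+" then "*" :: xs else if x = "*" then "||" :: xs else "+" :: pvIncSpec xs

-- A's loop, positioned after an already-carried prefix, computes pvIncSpec on the suffix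
lemma loopA_eq_spec (cur : List String) (h : Pre_inc_op_set cur) :
    ∀ pre : List String, incLoopA (pre ++ cur) pre.length = pre ++ pvIncSpec cur := by
  induction cur with
  | nil =>
    intro pre
    rw [incLoopA]
    simp [pvIncSpec]
  | cons x xs ih =>
    intro pre
    rw [incLoopA]
    have hlen : ¬ (pre ++ x :: xs).length ≤ pre.length := by simp
    have hget : (pre ++ x :: xs).getD pre.length "" = x := by
      rw [List.getD_eq_getElem?_getD, List.getElem?_append_right (Nat.le_refl pre.length)]; simp
    have hset : ∀ v : String, (pre ++ x :: xs).set pre.length v = pre ++ v :: xs := by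
      intro v
      rw [List.set_append]; simp
    by_cases h1 : x = "+"
    · subst h1
      rw [dif_neg hlen, hget]; simp [hset, pvIncSpec]
    · by_cases h2 : x = "*"
      · subst h2
        rw [dif_neg hlen, hget]; simp [hset, pvIncSpec]
      · have hx : x = "||" := by
          by_contra hne
          have hxm : x ∈ (List.dropWhile (fun t => t == "||") (x :: xs)).take 1 := by
            simp [hne]
          rcases h x hxm with h' | h' <;> [exact h1 h'; exact h2 h']
        subst hx
        have hxs : Pre_inc_op_set xs := by
          unfold Pre_inc_op_set at h ⊢
          simpa [List.dropWhile_cons] using h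
        rw [dif_neg hlen, hget]
        simp only [hset, reduceIte]
        have hstep : incLoopA (pre ++ "+" :: xs) (pre.length + 1)
            = incLoopA ((pre ++ ["+"]) ++ xs) (pre ++ ["+"]).length := by
          simp
        rw [hstep, ih hxs (pre ++ ["+"])]
        simp [pvIncSpec]

-- ===== B-side helpers: window, digit value, window sum, decoder =====
def pvW (l : List String) : Nat :=
  match l.findIdx? (fun op => op != "||") with
  | some i => i + 1
  | none => l.length

def pvDv (s : String) : Int :=
  ((PySem.Dict.ofList [("+", (0:Int)), ("*", 1), ("||", 2)]).get? s).getD 0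

def pvS (l : List String) (w : Nat) : Int :=
  ((List.range w).map (fun i => pvDv (l.getD i "") * 3 ^ i)).sum

def pvDec : Nat → Int → List String
  | 0, _ => []
  | k + 1, m =>
    (PySem.List.pyGet? ["+", "*", "||"] (PySem.Int.mod m 3)).getD ""
      :: pvDec k (PySem.Int.floordiv m 3)

lemma pvW_cons_op (x : String) (xs : List String) (hx : x ≠ "||") : pvW (x :: xs) = 1 := by
  have hb : (x != "||") = true := by simpa using hx
  simp [pvW, List.findIdx?_cons, hb]

lemma pvW_cons_bar (xs : List String) : pvW ("||" :: xs) = pvW xs + 1 := by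
  unfold pvW
  rw [List.findIdx?_cons]
  cases hf : xs.findIdx? (fun op => op != "||") <;> simp

lemma pvS_shift (x : String) (xs : List String) (w : Nat) :
    pvS (x :: xs) (w + 1) = pvDv x + 3 * pvS xs w := by
  unfold pvS
  rw [List.range_succ_eq_map, List.map_cons, List.sum_cons, List.map_map]
  simp only [Function.comp_def, List.getD_cons_succ, List.getD_cons_zero, pow_zero, mul_one,
    pow_succ]
  rw [show (fun i => pvDv (xs.getD i "") * (3 ^ i * 3))
      = (fun i => pvDv (xs.getD i "") * 3 ^ i * 3) from by funext i; ring,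
    List.sum_map_mul_right]
  ring

-- the port's decoding map equals pvDec
lemma dec_map (k : Nat) : ∀ m : Int, 0 ≤ m →
    (List.range k).map (fun i =>
      (PySem.List.pyGet? ["+", "*", "||"] (PySem.Int.mod (PySem.Int.floordiv m (3 ^ i)) 3)).getD "")
      = pvDec k m := by
  induction k with
  | zero => intro m _; simp [pvDec]
  | succ k ih =>
    intro m hm
    rw [List.range_succ_eq_map, List.map_cons, List.map_map]
    have h0 : PySem.Int.floordiv m (3 ^ (0:Nat)) = m := by
      rw [PySem.Int.floordiv_eq_ediv_of_pos (by norm_num)]; simp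
    have hrest : ∀ i : Nat,
        PySem.Int.floordiv m (3 ^ (i + 1)) = PySem.Int.floordiv (PySem.Int.floordiv m 3) (3 ^ i) := by
      intro i
      rw [PySem.Int.floordiv_eq_ediv_of_pos (b := 3) (by norm_num),
        PySem.Int.floordiv_eq_ediv_of_pos (by positivity),
        PySem.Int.floordiv_eq_ediv_of_pos (by positivity)]
      rw [pow_succ, mul_comm, ← Int.ediv_ediv_of_nonneg (by norm_num : (0:Int) ≤ 3)]
    rw [show pvDec (k + 1) m = (PySem.List.pyGet? ["+", "*", "||"] (PySem.Int.mod m 3)).getD ""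
        :: pvDec k (PySem.Int.floordiv m 3) from rfl,
      ← ih (PySem.Int.floordiv m 3) (by
        rw [PySem.Int.floordiv_eq_ediv_of_pos (by norm_num)]
        exact Int.ediv_nonneg hm (by norm_num))]
    congr 1
    · rw [h0]
    · apply List.map_congr_left
      intro i _
      simp only [Function.comp_apply, hrest i]

-- the port's generator-sum, with the Python indexing normalized, is pvS
lemma n_eq (l : List String) (w : Nat) :
    ((List.range w).map
      (fun (i : Nat) => (((PySem.Dict.ofList [("+", (0:Int)), ("*", 1), ("||", 2)]).get?
        (PySem.List.pyGetD l (i : Int) "")).getD 0) * 3 ^ i)).sum = pvS l w := by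
  unfold pvS pvDv
  simp [PySem.List.pyGetD_natCast]

-- B's port in terms of the helpers
lemma alt_form (l : List String) :
    inc_op_set_alt l
      = pvDec (pvW l) (PySem.Int.mod (pvS l (pvW l) + 1) (3 ^ pvW l)) ++ l.drop (pvW l) := by
  unfold inc_op_set_alt
  simp only []
  rw [show (match l.findIdx? (fun op => op != "||") with
      | some i => i + 1
      | none => l.length) = pvW l from rfl]
  rw [n_eq l (pvW l),
    dec_map (pvW l) _ (PySem.Int.mod_nonneg _ (by positivity))]

-- B performs the carry increment: windowed add-one-and-decode is pvIncSpec
lemma alt_eq_spec (l : List String) (h : Pre_inc_op_set l) :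
    inc_op_set_alt l = pvIncSpec l := by
  induction l with
  | nil => rfl
  | cons x xs ih =>
    by_cases hx : x = "||"
    · subst hx
      have hxs : Pre_inc_op_set xs := by
        unfold Pre_inc_op_set at h ⊢
        simpa [List.dropWhile_cons] using h
      rw [alt_form, pvW_cons_bar, pvS_shift]
      have hdv : pvDv "||" = 2 := by decide
      have hpow : (0:Int) < 3 ^ pvW xs := by positivity
      have hm : PySem.Int.mod (pvDv "||" + 3 * pvS xs (pvW xs) + 1) (3 ^ (pvW xs + 1))
          = 3 * PySem.Int.mod (pvS xs (pvW xs) + 1) (3 ^ pvW xs) := by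
        rw [hdv, PySem.Int.mod_eq_emod_of_pos (by positivity), PySem.Int.mod_eq_emod_of_pos hpow]
        have h1 : (2:Int) + 3 * pvS xs (pvW xs) + 1 = 3 * (pvS xs (pvW xs) + 1) := by ring
        have h2 : (3:Int) ^ (pvW xs + 1) = 3 * 3 ^ pvW xs := by rw [pow_succ]; ring
        rw [h1, h2, Int.mul_emod_mul_of_pos _ _ (by norm_num)]
      rw [hm]
      have ht : 0 ≤ PySem.Int.mod (pvS xs (pvW xs) + 1) (3 ^ pvW xs) :=
        PySem.Int.mod_nonneg _ hpow
      unfold pvDec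
      have hmod : PySem.Int.mod (3 * PySem.Int.mod (pvS xs (pvW xs) + 1) (3 ^ pvW xs)) 3 = 0 := by
        rw [PySem.Int.mod_eq_emod_of_pos (by norm_num)]; omega
      have hdiv : PySem.Int.floordiv (3 * PySem.Int.mod (pvS xs (pvW xs) + 1) (3 ^ pvW xs)) 3
          = PySem.Int.mod (pvS xs (pvW xs) + 1) (3 ^ pvW xs) := by
        rw [PySem.Int.floordiv_eq_ediv_of_pos (by norm_num)]; omega
      rw [hmod, hdiv, List.drop_succ_cons, List.cons_append]
      have hback : pvDec (pvW xs) (PySem.Int.mod (pvS xs (pvW xs) + 1) (3 ^ pvW xs)) ++ xs.drop (pvW xs)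
          = inc_op_set_alt xs := (alt_form xs).symm
      rw [hback, ih hxs]
      simp [pvIncSpec, PySem.List.pyGet?, PySem.List.pyIdx?]
    · have hxv : x = "+" ∨ x = "*" := by
        have hxm : x ∈ (List.dropWhile (fun t => t == "||") (x :: xs)).take 1 := by
          simp [hx]
        exact h x hxm
      rw [alt_form, pvW_cons_op x xs hx, List.drop_one, List.tail_cons]
      have hS : pvS (x :: xs) 1 = pvDv x := by
        rw [show (1:Nat) = 0 + 1 from rfl, pvS_shift]
        simp [pvS]
      rw [hS]
      rcases hxv with h' | h'
      · subst h'
        have hdec : pvDec 1 (PySem.Int.mod (pvDv "+" + 1) (3 ^ (1:Nat))) = ["*"] := by decide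
        rw [hdec]; simp [pvIncSpec]
      · subst h'
        have hdec : pvDec 1 (PySem.Int.mod (pvDv "*" + 1) (3 ^ (1:Nat))) = ["||"] := by decide
        rw [hdec]; simp [pvIncSpec]

-- ===== VERDICT (by name: the statement is the Claim_ definition above) =====
theorem inc_op_set_spec : Claim_equal_inc_op_set := by
  intro op_set _ hpre
  unfold Spec_inc_op_set
  have hA : inc_op_set op_set = pvIncSpec op_set := by
    have := loopA_eq_spec op_set hpre []
    simpa [inc_op_set] using this
  rw [hA, alt_eq_spec op_set hpre]
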